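-- pv_equiv track=rewrite | github.com/TiagodePAlves/MC346-prolog | utils/format.py | take_and_peek
-- ===== SOURCE A (Python) =====
-- from typing import (
--     Iterable, Iterator, TypeVar, Optional,
--     Callable, Union, TextIO, Tuple, List
-- )
--
-- T = TypeVar('T')
--
-- def take_and_peek(iterable: Iterable[T]) -> Iterator[Tuple[T, Optional[T]]]:
--     iterator = iter(iterable)
--     try:
--         this = next(iterator)
--     except StopIteration:
--         return
--
--     for val in iterator:
--         yield this, val
--         this = val
--     yield this, None
-- ===== SOURCE B (Python) =====
-- def take_and_peek(iterable):
--     # Build the pairs back-to-front: walk the input in reverse carrying the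
--     # successor seen so far (None at the start), then reverse the accumulator.
--     out = []
--     nxt = None
--     for x in reversed(list(iterable)):
--         out.append((x, nxt))
--         nxt = x
--     out.reverse()
--     return out
-- ===== Notes on version B (the rewrite author's own statement) =====
-- stated objective: alternative
-- what changed: Replaces A's forward generator loop that carries the previous element and ends with a special (last, None) yield by a back-to-front construction: traverse the reversed input carrying the successor seen so far (initially None), then reverse the accumulator; the trailing None arises as the first pair built, not a final special case. Return value only: B materializes the iterable and returns the list of pairs instead of a lazy generator.
import Mathlib
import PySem

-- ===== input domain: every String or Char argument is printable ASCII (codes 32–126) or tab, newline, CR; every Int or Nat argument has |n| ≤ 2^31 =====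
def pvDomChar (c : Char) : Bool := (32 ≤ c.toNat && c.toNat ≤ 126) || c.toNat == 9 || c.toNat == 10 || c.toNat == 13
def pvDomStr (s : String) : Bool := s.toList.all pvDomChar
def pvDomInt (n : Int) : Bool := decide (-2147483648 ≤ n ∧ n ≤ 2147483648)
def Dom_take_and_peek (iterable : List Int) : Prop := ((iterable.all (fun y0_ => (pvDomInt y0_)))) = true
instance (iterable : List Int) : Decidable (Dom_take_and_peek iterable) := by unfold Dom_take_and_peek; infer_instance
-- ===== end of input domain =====

-- B builds the pair list back-to-front over the reversed input (successor carried backwards, final reverse)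
-- instead of A's forward lookahead loop with a special trailing yield; return-value equivalence only
-- (A is a lazy generator, B returns the list of pairs).
-- ===== PORT A =====
-- the generator's for-loop: yields (this, val) and carries this := val; final yield (this, None)
def take_and_peek_loop (this : Int) : List Int → List (Int × Option Int)
  | [] => [(this, none)]
  | v :: rest => (this, some v) :: take_and_peek_loop v rest

def take_and_peek (iterable : List Int) : List (Int × Option Int) :=
  match iterable with
  | [] => []          -- next(iterator) raised StopIteration: return
  | this :: rest => take_and_peek_loop this rest

-- ===== PORT B =====
-- state (out, nxt); for x in reversed(list(iterable)): out.append((x, nxt)); nxt = x — then out.reverse()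
def take_and_peek_alt (iterable : List Int) : List (Int × Option Int) :=
  let st := iterable.reverse.foldl
    (fun (st : List (Int × Option Int) × Option Int) x => (st.1 ++ [(x, st.2)], some x))
    ([], none)
  st.1.reverse

-- ===== PRECONDITION & SPEC =====
def Spec_take_and_peek (iterable : List Int) (out : List (Int × Option Int)) : Prop := out = take_and_peek_alt iterable
instance (iterable : List Int) (out : List (Int × Option Int)) : Decidable (Spec_take_and_peek iterable out) := by unfold Spec_take_and_peek; infer_instance

-- ===== CLAIM (what is proved, stated in full; the proofs are below) =====
def Claim_equal_take_and_peek : Prop := ∀ (iterable : List Int), Dom_take_and_peek iterable → Spec_take_and_peek iterable (take_and_peek iterable)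

-- ===== LEMMAS AND PROOFS =====
-- Invariant of B's backward fold: after folding a suffix xs, the accumulator holds
-- A's pairs for xs in reverse order, and the carried successor is xs.head?.
theorem alt_fold_invariant (xs : List Int) :
    List.foldr (fun x (st : List (Int × Option Int) × Option Int) => (st.1 ++ [(x, st.2)], some x))
      ([], none) xs = ((take_and_peek xs).reverse, xs.head?) := by
  induction xs with
  | nil => simp [take_and_peek]
  | cons v rest ih =>
      simp only [List.foldr_cons, ih]
      cases rest with
      | nil => simp [take_and_peek, take_and_peek_loop]
      | cons w r => simp [take_and_peek, take_and_peek_loop]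

-- ===== VERDICT =====
theorem take_and_peek_spec : Claim_equal_take_and_peek := by
  intro iterable _
  unfold Spec_take_and_peek take_and_peek_alt
  rw [List.foldl_reverse]
  simp [alt_fold_invariant]
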